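-- pv_equiv track=rewrite | github.com/jbaldivieso/adventofcode | 2021/5.py | coordinate_pair2series_of_points
-- ===== SOURCE A (Python) =====
-- def coordinate_pair2series_of_points(pair: tuple) -> list:
--     """Given a coordinate pair, return a list of points that they describe.
--     If the points aren't a vertical or horizontal line, the list will be empty.
--     """
--     results = []
--     p1, p2 = pair
--     # Vertical or horizontal or neither?
--     if p1[0] == p2[0]:
--         # Vertical
--         index = 1
--     elif p1[1] == p2[1]:
--         # Horizontal
--         index = 0
--     else:
--         # Neither
--         return results
--     # Sort them
--     if p1[index] > p2[index]:
--         p2, p1 = p1, p2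
--     for x in range(p2[index] - p1[index] + 1):
--         if index == 0:
--             results.append((p1[0] + x, p1[1]))
--         else:
--             results.append((p1[0], p1[1] + x))
--     return results
-- ===== SOURCE B (Python) =====
-- def coordinate_pair2series_of_points(pair: tuple) -> list:
--     """Given a coordinate pair, return a list of points that they describe.
--     If the points aren't a vertical or horizontal line, the list will be empty.
--     """
--     p1, p2 = pair
--     if p1[0] != p2[0] and p1[1] != p2[1]:
--         return []
--     lo, hi = (p1, p2) if p1 <= p2 else (p2, p1)
--     dx = (hi[0] > lo[0]) - (hi[0] < lo[0])
--     dy = (hi[1] > lo[1]) - (hi[1] < lo[1])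
--     pts = []
--     x, y = lo
--     while (x, y) != hi:
--         pts.append((x, y))
--         x += dx
--         y += dy
--     pts.append(hi)
--     return pts
-- ===== Notes on version B (the rewrite author's own statement) =====
-- stated objective: alternative
-- what changed: Replaces the axis-index selection plus range-loop with an if-branch inside by a direction-vector walk: sort the two endpoints lexicographically, compute a unit step (dx,dy) by sign, and step a current position from the low to the high endpoint, emitting each point once.
import Mathlib
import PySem

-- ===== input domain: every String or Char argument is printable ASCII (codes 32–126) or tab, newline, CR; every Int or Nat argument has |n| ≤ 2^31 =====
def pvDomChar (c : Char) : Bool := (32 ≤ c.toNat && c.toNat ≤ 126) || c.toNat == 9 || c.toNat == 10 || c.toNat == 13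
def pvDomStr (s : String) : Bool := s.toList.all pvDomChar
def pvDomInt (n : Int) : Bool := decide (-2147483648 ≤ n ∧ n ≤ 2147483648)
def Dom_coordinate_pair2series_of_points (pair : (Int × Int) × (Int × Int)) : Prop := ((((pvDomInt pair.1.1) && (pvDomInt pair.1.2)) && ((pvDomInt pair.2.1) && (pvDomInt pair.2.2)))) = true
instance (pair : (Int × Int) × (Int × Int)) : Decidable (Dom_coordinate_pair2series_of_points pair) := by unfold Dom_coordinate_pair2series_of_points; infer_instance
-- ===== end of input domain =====

-- B replaces A's axis-index + range loop by a lexicographic endpoint sort and a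
-- unit-direction position walk (same cost, different decomposition).


-- ===== PORT A =====
-- Literal port: branch chooses the index (1 vertical, 0 horizontal, none → return []),
-- then the endpoints are swapped if out of order, and range(d+1) is folded appending points.
def coordinate_pair2series_of_points (pair : (Int × Int) × (Int × Int)) : List (Int × Int) :=
  let results : List (Int × Int) := []
  let p1 := pair.1
  let p2 := pair.2
  let index? : Option Int := if p1.1 = p2.1 then some 1 else if p1.2 = p2.2 then some 0 else none
  match index? with
  | none => results
  | some index =>
    let pr := if (if index = 0 then p1.1 else p1.2) > (if index = 0 then p2.1 else p2.2)
              then (p2, p1) else (p1, p2)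
    let q1 := pr.1
    let q2 := pr.2
    (PySem.List.pyRange 0 ((if index = 0 then q2.1 else q2.2) - (if index = 0 then q1.1 else q1.2) + 1) 1).foldl
      (fun acc x => acc ++ [if index = 0 then (q1.1 + x, q1.2) else (q1.1, q1.2 + x)]) results

-- ===== PORT B =====
-- (b > 0) - (b < 0), the unit sign used by Source B.
def pvSign (a : Int) : Int := (if a > 0 then 1 else 0) - (if a < 0 then 1 else 0)

-- The while-loop of Source B: step (x,y) by (dx,dy) appending, until it reaches hi.
-- The fuel passed below is exactly the number of iterations the Python loop makes
-- ((hi.1-lo.1)+(hi.2-lo.2), one coordinate difference being 0 and the other ≥ 0),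
-- so the port computes step for step what the while loop computes.
def pvWalk (hi : Int × Int) (dx dy : Int) : Nat → Int × Int → List (Int × Int)
  | 0, _ => []
  | n+1, p => if p = hi then [] else p :: pvWalk hi dx dy n (p.1 + dx, p.2 + dy)

def coordinate_pair2series_of_points_alt (pair : (Int × Int) × (Int × Int)) : List (Int × Int) :=
  let p1 := pair.1
  let p2 := pair.2
  if p1.1 ≠ p2.1 ∧ p1.2 ≠ p2.2 then []
  else
    let lohi := if p1.1 < p2.1 ∨ (p1.1 = p2.1 ∧ p1.2 ≤ p2.2) then (p1, p2) else (p2, p1)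
    let lo := lohi.1
    let hi := lohi.2
    let dx := pvSign (hi.1 - lo.1)
    let dy := pvSign (hi.2 - lo.2)
    pvWalk hi dx dy ((hi.1 - lo.1) + (hi.2 - lo.2)).toNat lo ++ [hi]

-- ===== PRECONDITION & SPEC =====
def Spec_coordinate_pair2series_of_points (pair : (Int × Int) × (Int × Int)) (out : List (Int × Int)) : Prop := out = coordinate_pair2series_of_points_alt pair
instance (pair : (Int × Int) × (Int × Int)) (out : List (Int × Int)) : Decidable (Spec_coordinate_pair2series_of_points pair out) := by unfold Spec_coordinate_pair2series_of_points; infer_instance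

-- ===== CLAIM (what is proved, stated in full; the proofs are below) =====
def Claim_equal_coordinate_pair2series_of_points : Prop := ∀ (pair : (Int × Int) × (Int × Int)), Dom_coordinate_pair2series_of_points pair → Spec_coordinate_pair2series_of_points pair (coordinate_pair2series_of_points pair)

-- ===== LEMMAS AND PROOFS =====

theorem pv_flatten_sing {α β : Type} (f : α → β) :
    ∀ (l : List α), (l.map (fun a => [f a])).flatten = l.map f := by
  intro l
  induction l with
  | nil => simp
  | cons a t ih => simp [ih]

theorem pvSign_pos {a : Int} (h : 0 < a) : pvSign a = 1 := by
  unfold pvSign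
  rw [if_pos h, if_neg (by omega)]
  norm_num

theorem pvSign_self_zero (a : Int) : pvSign (a - a) = 0 := by
  unfold pvSign
  norm_num

theorem pv_walkV : ∀ (n : Nat) (x y : Int),
    pvWalk (x, y + (n : Int)) 0 1 n (x, y)
      = (List.range n).map (fun i : Nat => (x, y + (i : Int))) := by
  intro n
  induction n with
  | zero => intro x y; simp [pvWalk]
  | succ n ih =>
    intro x y
    have hne : (x, y) ≠ (x, y + ((n + 1 : Nat) : Int)) := by
      intro h
      have := congrArg Prod.snd h
      simp at this
      omega
    have h1 : y + ((n + 1 : Nat) : Int) = (y + 1) + (n : Int) := by push_cast; ring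
    rw [pvWalk, if_neg hne]
    have h2 : pvWalk (x, y + ((n + 1 : Nat) : Int)) 0 1 n ((x, y).1 + 0, (x, y).2 + 1)
        = (List.range n).map (fun i : Nat => (x, (y + 1) + (i : Int))) := by
      rw [show ((x, y).1 + 0, (x, y).2 + 1) = (x, y + 1) by simp, h1]
      exact ih x (y + 1)
    rw [h2, List.range_succ_eq_map, List.map_cons, List.map_map]
    refine congrArg₂ List.cons (by simp) ?_
    apply List.map_congr_left
    intro i _
    have h3 : (y + 1) + (i : Int) = y + ((Nat.succ i : Nat) : Int) := by push_cast; ring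
    simp [Function.comp, h3]

theorem pv_walkH : ∀ (n : Nat) (x y : Int),
    pvWalk (x + (n : Int), y) 1 0 n (x, y)
      = (List.range n).map (fun i : Nat => (x + (i : Int), y)) := by
  intro n
  induction n with
  | zero => intro x y; simp [pvWalk]
  | succ n ih =>
    intro x y
    have hne : (x, y) ≠ (x + ((n + 1 : Nat) : Int), y) := by
      intro h
      have := congrArg Prod.fst h
      simp at this
      omega
    have h1 : x + ((n + 1 : Nat) : Int) = (x + 1) + (n : Int) := by push_cast; ring
    rw [pvWalk, if_neg hne]
    have h2 : pvWalk (x + ((n + 1 : Nat) : Int), y) 1 0 n ((x, y).1 + 1, (x, y).2 + 0)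
        = (List.range n).map (fun i : Nat => ((x + 1) + (i : Int), y)) := by
      rw [show ((x, y).1 + 1, (x, y).2 + 0) = (x + 1, y) by simp, h1]
      exact ih (x + 1) y
    rw [h2, List.range_succ_eq_map, List.map_cons, List.map_map]
    refine congrArg₂ List.cons (by simp) ?_
    apply List.map_congr_left
    intro i _
    have h3 : (x + 1) + (i : Int) = x + ((Nat.succ i : Nat) : Int) := by push_cast; ring
    simp [Function.comp, h3]

-- A's value in each configuration
theorem pvA_vert (x y1 y2 : Int) (h : ¬ y1 > y2) :
    coordinate_pair2series_of_points ((x, y1), (x, y2))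
      = (List.range (y2 - y1 + 1).toNat).map (fun k : Nat => (x, y1 + (k : Int))) := by
  unfold coordinate_pair2series_of_points
  norm_num [h]
  rw [pv_flatten_sing, PySem.List.pyRange_one, List.map_map,
    show y2 - y1 + 1 - 0 = y2 - y1 + 1 by ring]
  apply List.map_congr_left
  intro k _
  simp

theorem pvA_vert_gt (x y1 y2 : Int) (h : y1 > y2) :
    coordinate_pair2series_of_points ((x, y1), (x, y2))
      = (List.range (y1 - y2 + 1).toNat).map (fun k : Nat => (x, y2 + (k : Int))) := by
  unfold coordinate_pair2series_of_points
  norm_num [h]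
  rw [pv_flatten_sing, PySem.List.pyRange_one, List.map_map,
    show y1 - y2 + 1 - 0 = y1 - y2 + 1 by ring]
  apply List.map_congr_left
  intro k _
  simp

theorem pvA_horiz (x1 x2 y : Int) (hne : x1 ≠ x2) (h : ¬ x1 > x2) :
    coordinate_pair2series_of_points ((x1, y), (x2, y))
      = (List.range (x2 - x1 + 1).toNat).map (fun k : Nat => (x1 + (k : Int), y)) := by
  unfold coordinate_pair2series_of_points
  norm_num [hne, h]
  rw [pv_flatten_sing, PySem.List.pyRange_one, List.map_map,
    show x2 - x1 + 1 - 0 = x2 - x1 + 1 by ring]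
  apply List.map_congr_left
  intro k _
  simp

theorem pvA_horiz_gt (x1 x2 y : Int) (hne : x1 ≠ x2) (h : x1 > x2) :
    coordinate_pair2series_of_points ((x1, y), (x2, y))
      = (List.range (x1 - x2 + 1).toNat).map (fun k : Nat => (x2 + (k : Int), y)) := by
  unfold coordinate_pair2series_of_points
  norm_num [hne, h]
  rw [pv_flatten_sing, PySem.List.pyRange_one, List.map_map,
    show x1 - x2 + 1 - 0 = x1 - x2 + 1 by ring]
  apply List.map_congr_left
  intro k _
  simp

theorem pvA_diag (x1 y1 x2 y2 : Int) (hx : x1 ≠ x2) (hy : y1 ≠ y2) :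
    coordinate_pair2series_of_points ((x1, y1), (x2, y2)) = [] := by
  unfold coordinate_pair2series_of_points
  simp [hx, hy]

-- B's value on a sorted vertical segment, parametrised by the step count n
theorem pvB_vert_n (x y1 : Int) (n : Nat) :
    coordinate_pair2series_of_points_alt ((x, y1), (x, y1 + (n : Int)))
      = (List.range n).map (fun k : Nat => (x, y1 + (k : Int))) ++ [(x, y1 + (n : Int))] := by
  unfold coordinate_pair2series_of_points_alt
  simp only [ne_eq, not_true_eq_false, false_and, if_false, lt_self_iff_false, true_and,
    false_or]
  rw [if_pos (by omega : y1 ≤ y1 + (n : Int))]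
  rw [pvSign_self_zero, show y1 + (n : Int) - y1 = (n : Int) by ring,
    show ((x - x) + (n : Int)).toNat = n by omega]
  cases n with
  | zero => simp [pvWalk]
  | succ m =>
    rw [pvSign_pos (by omega : (0:Int) < ((m + 1 : Nat) : Int)), pv_walkV]

-- B's value on a sorted horizontal segment, parametrised by the step count n
theorem pvB_horiz_n (x1 y : Int) (n : Nat) :
    coordinate_pair2series_of_points_alt ((x1, y), (x1 + (n : Int), y))
      = (List.range n).map (fun k : Nat => (x1 + (k : Int), y)) ++ [(x1 + (n : Int), y)] := by
  unfold coordinate_pair2series_of_points_alt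
  have hcond : (x1 < x1 + (n : Int) ∨ (x1 = x1 + (n : Int) ∧ y ≤ y)) := by omega
  simp only [ne_eq, not_true_eq_false, and_false, if_false, if_pos hcond]
  rw [pvSign_self_zero, show x1 + (n : Int) - x1 = (n : Int) by ring,
    show ((n : Int) + (y - y)).toNat = n by omega]
  cases n with
  | zero => simp [pvWalk]
  | succ m =>
    rw [pvSign_pos (by omega : (0:Int) < ((m + 1 : Nat) : Int)), pv_walkH]

-- B swaps unsorted endpoints: it is symmetric in the pair
theorem pvB_swap_vert (x y1 y2 : Int) (h : y2 < y1) :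
    coordinate_pair2series_of_points_alt ((x, y1), (x, y2))
      = coordinate_pair2series_of_points_alt ((x, y2), (x, y1)) := by
  unfold coordinate_pair2series_of_points_alt
  simp only [ne_eq, not_true_eq_false, false_and, if_false,
    lt_self_iff_false, true_and, false_or]
  rw [if_neg (by omega : ¬ y1 ≤ y2), if_pos (by omega : y2 ≤ y1)]

theorem pvB_swap_horiz (x1 x2 y : Int) (h : x2 < x1) :
    coordinate_pair2series_of_points_alt ((x1, y), (x2, y))
      = coordinate_pair2series_of_points_alt ((x2, y), (x1, y)) := by
  unfold coordinate_pair2series_of_points_alt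
  simp only [ne_eq, not_true_eq_false, and_false, if_false,
    le_refl, and_true]
  rw [if_neg (by omega : ¬ (x1 < x2 ∨ x1 = x2)), if_pos (Or.inl h : x2 < x1 ∨ x2 = x1)]

-- glue: map over range (n+1) = map over range n plus the endpoint
theorem pv_glue (n : Nat) (f : Nat → Int × Int) :
    (List.range (n + 1)).map f = (List.range n).map f ++ [f n] := by
  rw [List.range_succ, List.map_append, List.map_singleton]

-- ===== VERDICT (by name: the statement is the Claim_ definition above) =====
theorem coordinate_pair2series_of_points_spec : Claim_equal_coordinate_pair2series_of_points := by
  intro pair _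
  obtain ⟨⟨x1, y1⟩, ⟨x2, y2⟩⟩ := pair
  unfold Spec_coordinate_pair2series_of_points
  by_cases hx : x1 = x2
  · subst hx
    by_cases hy : y1 ≤ y2
    · set n : Nat := (y2 - y1).toNat with hn
      have hy2 : y2 = y1 + (n : Int) := by omega
      rw [pvA_vert x1 y1 y2 (by omega), hy2, pvB_vert_n x1 y1 n]
      rw [show (y1 + (n : Int) - y1 + 1).toNat = n + 1 by omega, pv_glue]
    · set n : Nat := (y1 - y2).toNat with hn
      have hy1 : y1 = y2 + (n : Int) := by omega
      rw [pvA_vert_gt x1 y1 y2 (by omega), pvB_swap_vert x1 y1 y2 (by omega), hy1,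
        pvB_vert_n x1 y2 n]
      rw [show (y2 + (n : Int) - y2 + 1).toNat = n + 1 by omega, pv_glue]
  · by_cases hyy : y1 = y2
    · subst hyy
      by_cases hx12 : x1 < x2
      · set n : Nat := (x2 - x1).toNat with hn
        have hx2 : x2 = x1 + (n : Int) := by omega
        rw [pvA_horiz x1 x2 y1 hx (by omega), hx2, pvB_horiz_n x1 y1 n]
        rw [show (x1 + (n : Int) - x1 + 1).toNat = n + 1 by omega, pv_glue]
      · set n : Nat := (x1 - x2).toNat with hn
        have hx1 : x1 = x2 + (n : Int) := by omega
        rw [pvA_horiz_gt x1 x2 y1 hx (by omega), pvB_swap_horiz x1 x2 y1 (by omega), hx1,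
          pvB_horiz_n x2 y1 n]
        rw [show (x2 + (n : Int) - x2 + 1).toNat = n + 1 by omega, pv_glue]
    · rw [pvA_diag x1 y1 x2 y2 hx hyy]
      unfold coordinate_pair2series_of_points_alt
      rw [if_pos ⟨hx, hyy⟩]
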